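-- pv_equiv track=rewrite | github.com/chriisataide/controle_atendimento_iconnect | scripts/apply_rbac.py | add_role_to_function_views
-- ===== SOURCE A (Python) =====
-- def add_role_to_function_views(content, roles, exclude_funcs=None):
--     """Add @role_required(...) after @login_required for function views."""
--     exclude_funcs = exclude_funcs or []
--     role_decorator = f"@role_required{roles}"
--
--     lines = content.split('\n')
--     new_lines = []
--     i = 0
--     while i < len(lines):
--         line = lines[i]
--         new_lines.append(line)
--
--         # Check if this line is @login_required (standalone, not in method_decorator)
--         stripped = line.strip()
--         if stripped == '@login_required':
--             # Look ahead for the function name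
--             j = i + 1
--             while j < len(lines):
--                 next_stripped = lines[j].strip()
--                 if next_stripped.startswith('def '):
--                     func_name = next_stripped.split('(')[0].replace('def ', '')
--                     if func_name not in exclude_funcs:
--                         # Check if role_required is already there
--                         between = '\n'.join(lines[i+1:j])
--                         if 'role_required' not in between:
--                             indent = len(line) - len(line.lstrip())
--                             new_lines.append(' ' * indent + role_decorator)
--                     break
--                 elif next_stripped.startswith('@'):
--                     # Another decorator, skip
--                     break
--                 elif next_stripped == '':
--                     break
--                 else:
--                     break
--                 j += 1
--         i += 1
--
--     return '\n'.join(new_lines)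
-- ===== SOURCE B (Python) =====
-- def add_role_to_function_views(content, roles, exclude_funcs=None):
--     """Add @role_required(...) after @login_required for function views.
--
--     Pairwise decomposition: the output is the first line followed by, for every
--     consecutive pair (prev, cur) of lines, either [decorator, cur] or [cur],
--     where the decorator (indented like prev) is emitted exactly when prev strips
--     to '@login_required' and cur is a non-excluded 'def ' line."""
--     excl = exclude_funcs or []
--     deco = "@role_required" + roles
--     lines = content.split('\n')
--
--     def emitted(prev, cur):
--         s = cur.strip()
--         if (prev.strip() == '@login_required' and s.startswith('def ')
--                 and s.split('(')[0].replace('def ', '') not in excl):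
--             return [' ' * (len(prev) - len(prev.lstrip())) + deco, cur]
--         return [cur]
--
--     pieces = lines[:1] + [x for p, c in zip(lines, lines[1:]) for x in emitted(p, c)]
--     return '\n'.join(pieces)
-- ===== Notes on version B (the rewrite author's own statement) =====
-- stated objective: alternative
-- what changed: Replaced A's stateful while-loop with a per-hit look-ahead scan (and its dead 'role_required'-in-between slice check) by a stateless pairwise decomposition: zip the lines with their successors and flat-map each consecutive pair to either [decorator, line] or [line].
import Mathlib
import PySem

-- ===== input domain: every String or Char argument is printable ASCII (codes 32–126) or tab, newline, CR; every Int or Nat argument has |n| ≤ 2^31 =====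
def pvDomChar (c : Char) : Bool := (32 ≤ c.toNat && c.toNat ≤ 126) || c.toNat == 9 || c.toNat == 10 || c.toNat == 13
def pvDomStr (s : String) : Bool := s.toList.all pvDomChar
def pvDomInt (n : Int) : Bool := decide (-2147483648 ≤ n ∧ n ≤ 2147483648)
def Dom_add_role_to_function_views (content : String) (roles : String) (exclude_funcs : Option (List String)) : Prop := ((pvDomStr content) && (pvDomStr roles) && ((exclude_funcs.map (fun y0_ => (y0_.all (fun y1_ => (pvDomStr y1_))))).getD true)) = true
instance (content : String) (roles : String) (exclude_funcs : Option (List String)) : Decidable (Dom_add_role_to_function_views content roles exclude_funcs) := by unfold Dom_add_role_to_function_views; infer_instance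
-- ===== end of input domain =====

-- B replaces A's stateful look-ahead while-loop by a stateless flat-map over
-- consecutive line pairs (objective: alternative).

-- ===== PORT A =====
-- A's inner `while j < len(lines)` loop: every branch ends in `break`, so only
-- lines[i+1] (the head of `rest`) is ever examined; `j += 1` is unreachable and
-- `between = '\n'.join(lines[i+1:j])` is the join of the empty slice.
def pvA_lookahead (deco : List Char) (excl : List String) (line : List Char)
    (rest : List (List Char)) : List (List Char) :=
  match rest with
  | [] => []
  | next :: _ =>
    let ns := PySem.Chars.strip next
    if PySem.Chars.startswith ns "def ".toList then
      let func_name := PySem.Chars.replace ((PySem.Chars.splitOn ns "(".toList).headI) "def ".toList []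
      if func_name ∈ excl.map String.toList then []
      else
        let between : List Char := PySem.Chars.join "\n".toList []
        if PySem.Chars.isIn "role_required".toList between then []
        else
          let indent := line.length - (PySem.Chars.lstrip line).length
          [List.replicate indent ' ' ++ deco]
    else if PySem.Chars.startswith ns "@".toList then []
    else if ns = ([] : List Char) then []
    else []

-- A's outer `while i < len(lines)` loop as structural recursion over the lines.
def pvA_go (deco : List Char) (excl : List String) : List (List Char) → List (List Char)
  | [] => []
  | line :: rest =>
    line :: ((if PySem.Chars.strip line = "@login_required".toList
              then pvA_lookahead deco excl line rest else []) ++ pvA_go deco excl rest)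

def add_role_to_function_views (content : String) (roles : String) (exclude_funcs : Option (List String)) : String :=
  let excl : List String := match exclude_funcs with | none => [] | some l => l
  let deco := "@role_required".toList ++ roles.toList
  let lines := PySem.Chars.splitOn content.toList "\n".toList
  String.ofList (PySem.Chars.join "\n".toList (pvA_go deco excl lines))

-- ===== PORT B =====
-- Source B's `emitted(prev, cur)`: the pieces a consecutive pair contributes.
def pvB_emitted (deco : List Char) (excl : List String) (prev cur : List Char) : List (List Char) :=
  let s := PySem.Chars.strip cur
  if PySem.Chars.strip prev = "@login_required".toList ∧
     PySem.Chars.startswith s "def ".toList ∧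
     PySem.Chars.replace ((PySem.Chars.splitOn s "(".toList).headI) "def ".toList []
       ∉ excl.map String.toList then
    [List.replicate (prev.length - (PySem.Chars.lstrip prev).length) ' ' ++ deco, cur]
  else
    [cur]

def add_role_to_function_views_alt (content : String) (roles : String) (exclude_funcs : Option (List String)) : String :=
  let excl : List String := match exclude_funcs with | none => [] | some l => l
  let deco := "@role_required".toList ++ roles.toList
  let lines := PySem.Chars.splitOn content.toList "\n".toList
  -- pieces = lines[:1] + [x for p, c in zip(lines, lines[1:]) for x in emitted(p, c)]
  let pieces := lines.take 1 ++ (lines.zip lines.tail).flatMap (fun pc => pvB_emitted deco excl pc.1 pc.2)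
  String.ofList (PySem.Chars.join "\n".toList pieces)

-- ===== PRECONDITION & SPEC =====
def Spec_add_role_to_function_views (content : String) (roles : String) (exclude_funcs : Option (List String)) (out : String) : Prop := out = add_role_to_function_views_alt content roles exclude_funcs
instance (content : String) (roles : String) (exclude_funcs : Option (List String)) (out : String) : Decidable (Spec_add_role_to_function_views content roles exclude_funcs out) := by unfold Spec_add_role_to_function_views; infer_instance

-- ===== CLAIM (what is proved, stated in full; the proofs are below) =====
def Claim_equal_add_role_to_function_views : Prop := ∀ (content : String) (roles : String) (exclude_funcs : Option (List String)), Dom_add_role_to_function_views content roles exclude_funcs → Spec_add_role_to_function_views content roles exclude_funcs (add_role_to_function_views content roles exclude_funcs)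

-- ===== LEMMAS AND PROOFS =====

-- What one pair contributes equals A's conditional look-ahead insertion plus the line itself.
theorem pvB_emitted_eq (deco : List Char) (excl : List String) (p c : List Char)
    (rest : List (List Char)) :
    pvB_emitted deco excl p c =
      (if PySem.Chars.strip p = "@login_required".toList
       then pvA_lookahead deco excl p (c :: rest) else []) ++ [c] := by
  simp only [pvB_emitted, pvA_lookahead]
  have hIn : PySem.Chars.isIn "role_required".toList ([] : List Char) = false := by decide
  by_cases h1 : PySem.Chars.strip p = "@login_required".toList <;>
    by_cases h2 : PySem.Chars.startswith (PySem.Chars.strip c) "def ".toList = true <;>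
      by_cases h3 : PySem.Chars.replace ((PySem.Chars.splitOn (PySem.Chars.strip c) "(".toList).headI) "def ".toList [] ∈ excl.map String.toList <;>
        (simp_all; try (rw [if_neg (by push Not; simpa using h3)]; rfl))

-- The flat-map over the pairs starting at head p reproduces A's recursion from p on.
theorem pvB_pairs_eq (deco : List Char) (excl : List String) (p : List Char)
    (rest : List (List Char)) :
    ((p :: rest).zip rest).flatMap (fun pc => pvB_emitted deco excl pc.1 pc.2) =
      (if PySem.Chars.strip p = "@login_required".toList
       then pvA_lookahead deco excl p rest else []) ++ pvA_go deco excl rest := by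
  induction rest generalizing p with
  | nil => simp [pvA_go, pvA_lookahead]
  | cons c rs ih =>
    simp only [List.zip_cons_cons, List.flatMap_cons, ih c,
      pvB_emitted_eq deco excl p c rs, pvA_go]
    simp

theorem pvB_eq_pvA (deco : List Char) (excl : List String) (ls : List (List Char)) :
    ls.take 1 ++ (ls.zip ls.tail).flatMap (fun pc => pvB_emitted deco excl pc.1 pc.2) =
      pvA_go deco excl ls := by
  cases ls with
  | nil => rfl
  | cons l rest => simp [pvB_pairs_eq deco excl l rest, pvA_go]

-- ===== VERDICT (by name: the statement is the Claim_ definition above) =====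
theorem add_role_to_function_views_spec : Claim_equal_add_role_to_function_views := by
  intro content roles exclude_funcs _
  unfold Spec_add_role_to_function_views add_role_to_function_views add_role_to_function_views_alt
  simp only [pvB_eq_pvA]
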